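-- pv_equiv track=rewrite | github.com/z5267282/mve-tests | timestamp/timestamp.py | get_timestamp_seconds
-- ===== SOURCE A (Python) =====
-- def get_timestamp_seconds(timestamp):
--     return sum(
--         int(t) * (60 ** i)
--             for i, t in enumerate(
--                 reversed(
--                     timestamp.split(':')
--                 )
--             )
--     )
-- ===== SOURCE B (Python) =====
-- def get_timestamp_seconds(timestamp):
--     acc = 0
--     for t in timestamp.split(':'):
--         acc = acc * 60 + int(t)
--     return acc
-- ===== Notes on version B (the rewrite author's own statement) =====
-- stated objective: idiomatic
-- what changed: Replaces the reversed/enumerate power-weighted sum (int(t)*60**i) with a left-to-right Horner fold acc = acc*60 + int(t), eliminating the reversal and the power computation.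
import Mathlib
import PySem

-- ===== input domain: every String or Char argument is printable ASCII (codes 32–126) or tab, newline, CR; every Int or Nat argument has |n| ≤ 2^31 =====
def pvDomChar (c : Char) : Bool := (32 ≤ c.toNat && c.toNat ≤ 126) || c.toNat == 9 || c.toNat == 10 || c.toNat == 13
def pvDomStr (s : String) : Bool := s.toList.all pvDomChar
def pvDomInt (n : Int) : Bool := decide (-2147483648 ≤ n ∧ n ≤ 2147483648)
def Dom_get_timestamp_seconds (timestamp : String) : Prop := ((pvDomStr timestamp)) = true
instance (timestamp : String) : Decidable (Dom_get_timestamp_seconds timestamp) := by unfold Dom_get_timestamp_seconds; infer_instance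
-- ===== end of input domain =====

-- B replaces A's reversed/enumerate power-weighted sum with a left-to-right Horner fold (idiomatic; same O(n) cost).

-- ===== PORT A =====
-- sum(int(t) * (60 ** i) for i, t in enumerate(reversed(timestamp.split(':'))))
def get_timestamp_seconds (timestamp : String) : Int :=
  ((PySem.List.enumerate (((PySem.Str.split? timestamp ":").getD []).reverse) 0).map
      (fun p => ((PySem.Int.ofStr? p.2).getD 0) * (60 : Int) ^ p.1.toNat)).sum

-- ===== PORT B =====
-- acc = 0; for t in timestamp.split(':'): acc = acc * 60 + int(t); return acc
def get_timestamp_seconds_alt (timestamp : String) : Int :=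
  ((PySem.Str.split? timestamp ":").getD []).foldl
    (fun acc t => acc * 60 + (PySem.Int.ofStr? t).getD 0) 0

-- ===== PRECONDITION & SPEC =====
-- Pre_ excludes exactly the inputs where some colon-separated component is not an int literal: there Python's int() raises ValueError (in A and in B alike).
def Pre_get_timestamp_seconds (timestamp : String) : Prop :=
  (((PySem.Str.split? timestamp ":").getD []).all (fun t => (PySem.Int.ofStr? t).isSome)) = true
instance (timestamp : String) : Decidable (Pre_get_timestamp_seconds timestamp) := by unfold Pre_get_timestamp_seconds; infer_instance
def pvWitness_get_timestamp_seconds : String := "1:02:03"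

def Spec_get_timestamp_seconds (timestamp : String) (out : Int) : Prop := out = get_timestamp_seconds_alt timestamp
instance (timestamp : String) (out : Int) : Decidable (Spec_get_timestamp_seconds timestamp out) := by unfold Spec_get_timestamp_seconds; infer_instance

-- ===== CLAIM (what is proved, stated in full; the proofs are below) =====
def Claim_equal_get_timestamp_seconds : Prop := ∀ (timestamp : String), Dom_get_timestamp_seconds timestamp → Pre_get_timestamp_seconds timestamp → Spec_get_timestamp_seconds timestamp (get_timestamp_seconds timestamp)

-- ===== LEMMAS AND PROOFS =====

theorem pv_horner_shift (l : List Int) (a : Int) :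
    l.foldl (fun acc x => acc * 60 + x) a
      = a * (60 : Int) ^ l.length + l.foldl (fun acc x => acc * 60 + x) 0 := by
  induction l generalizing a with
  | nil => simp
  | cons x xs ih =>
    simp only [List.foldl_cons, List.length_cons]
    rw [ih (a * 60 + x), ih (0 * 60 + x)]
    ring

theorem pv_sum_rev_eq_horner (l : List Int) :
    ((PySem.List.enumerate l.reverse 0).map
        (fun p => p.2 * (60 : Int) ^ p.1.toNat)).sum
      = l.foldl (fun acc x => acc * 60 + x) 0 := by
  induction l with
  | nil => simp [PySem.List.enumerate]
  | cons x xs ih =>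
    have hrev : (x :: xs).reverse = xs.reverse ++ [x] := by simp
    rw [hrev, PySem.List.enumerate_append]
    simp only [List.map_append, List.sum_append, ih]
    rw [List.foldl_cons, pv_horner_shift xs (0 * 60 + x)]
    simp [List.length_reverse]
    ring

theorem pv_enumerate_map {α β : Type} (f : α → β) (l : List α) (s : Int) :
    PySem.List.enumerate (l.map f) s
      = (PySem.List.enumerate l s).map (fun p => (p.1, f p.2)) := by
  induction l generalizing s with
  | nil => rfl
  | cons x xs ih => simp [PySem.List.enumerate_cons, ih]

-- ===== VERDICT (by name: the statement is the Claim_ definition above) =====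
theorem get_timestamp_seconds_spec : Claim_equal_get_timestamp_seconds := by
  intro timestamp _ _
  unfold Spec_get_timestamp_seconds get_timestamp_seconds get_timestamp_seconds_alt
  have h := pv_sum_rev_eq_horner
    (((PySem.Str.split? timestamp ":").getD []).map (fun t => (PySem.Int.ofStr? t).getD 0))
  rw [← List.map_reverse] at h
  calc ((PySem.List.enumerate (((PySem.Str.split? timestamp ":").getD []).reverse) 0).map
          (fun p => ((PySem.Int.ofStr? p.2).getD 0) * (60 : Int) ^ p.1.toNat)).sum
      = ((PySem.List.enumerate ((((PySem.Str.split? timestamp ":").getD []).reverse).map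
            (fun t => (PySem.Int.ofStr? t).getD 0)) 0).map
          (fun p => p.2 * (60 : Int) ^ p.1.toNat)).sum := by
        rw [pv_enumerate_map, List.map_map]
        rfl
    _ = ((PySem.Str.split? timestamp ":").getD []).foldl
          (fun acc t => acc * 60 + (PySem.Int.ofStr? t).getD 0) 0 := by
        rw [h, List.foldl_map]
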